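-- pv_equiv track=rewrite | github.com/simaoarrais/Advanced-Algorithms | Assignment3/counter.py | misra_gries_counter
-- ===== SOURCE A (Python) =====
-- from collections import Counter as collections_counter
--
-- def misra_gries_counter(stream, k):
--     # Initialization
--     A = collections_counter()
--
--     # Processing
--     for j in stream:
--         if j in A:
--             A[j] += 1
--         elif len(A) < k - 1:
--             A[j] = 1
--         else:
--             for i in list(A.keys()):
--                 A[i] -= 1
--                 if A[i] == 0:
--                     del A[i]
--
--     return A
-- ===== SOURCE B (Python) =====
-- def misra_gries_counter(stream, k):
--     # Misra-Gries with a lazy global decrement offset d and an inverted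
--     # "bucket" index mapping each stored count to the set of keys holding it.
--     # A decrement step only bumps d and evicts exactly the keys in bucket d
--     # (their effective count is zero), so no pass over all counters is made.
--     counts = {}            # key -> stored count (effective count + d-at-entry offsets)
--     buckets = {}           # stored count -> set of keys currently holding it
--     d = 0
--     for j in stream:
--         v = counts.get(j)
--         if v is not None:
--             buckets[v].discard(j)
--             counts[j] = v + 1
--             buckets.setdefault(v + 1, set()).add(j)
--         elif len(counts) < k - 1:
--             counts[j] = d + 1
--             buckets.setdefault(d + 1, set()).add(j)
--         else:
--             d += 1
--             for key in buckets.pop(d, ()):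
--                 del counts[key]
--     return {key: v - d for key, v in counts.items()}
-- ===== Notes on version B (the rewrite author's own statement) =====
-- stated objective: alternative
-- what changed: B replaces A's decrement step (a pass over all stored counters, decrementing each and deleting those that hit zero) by a lazy global offset plus an inverted count-bucket index (stored count -> set of keys holding it): a decrement only bumps the offset and evicts exactly the keys in the zero bucket, so the inner pass over all counters disappears.
import Mathlib
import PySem

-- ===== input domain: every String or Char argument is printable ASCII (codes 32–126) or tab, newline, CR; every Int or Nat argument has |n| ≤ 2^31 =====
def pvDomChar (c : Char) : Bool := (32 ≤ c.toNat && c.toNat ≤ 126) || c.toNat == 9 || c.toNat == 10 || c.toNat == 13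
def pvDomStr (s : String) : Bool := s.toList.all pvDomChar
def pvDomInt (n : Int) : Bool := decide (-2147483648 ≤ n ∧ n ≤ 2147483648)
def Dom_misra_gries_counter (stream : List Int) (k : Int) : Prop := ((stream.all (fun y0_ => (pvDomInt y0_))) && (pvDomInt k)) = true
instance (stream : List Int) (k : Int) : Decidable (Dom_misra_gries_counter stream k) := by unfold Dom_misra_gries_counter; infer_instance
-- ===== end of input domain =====

-- B replaces A's decrement step (a pass over ALL stored counters, decrementing each
-- and deleting the ones that hit zero) by a lazy global offset d plus an inverted
-- count-bucket index (stored count -> set of keys holding it): a decrement step only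
-- bumps d and evicts exactly the keys in bucket d, so the pass over all counters
-- disappears (objective: alternative).

-- ===== PORT A =====
-- inner loop body: A[i] -= 1; if A[i] == 0: del A[i]
def mgDecStep (d : PySem.Dict Int Int) (i : Int) : PySem.Dict Int Int :=
  let d1 := d.insert i (d.getD i 0 - 1)
  if d1.getD i 0 == 0 then d1.erase i else d1

def mgStepA (k : Int) (d : PySem.Dict Int Int) (j : Int) : PySem.Dict Int Int :=
  if d.contains j then d.insert j (d.getD j 0 + 1)
  else if (d.size : Int) < k - 1 then d.insert j 1
  else d.keys.foldl mgDecStep d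

def misra_gries_counter (stream : List Int) (k : Int) : List (Int × Int) :=
  (stream.foldl (mgStepA k) PySem.Dict.empty).items

-- ===== PORT B =====
-- state: (counts, buckets, d); counts stores effective count + offset-at-entry,
-- buckets maps each stored count to the set of keys currently holding it.
-- 'buckets.setdefault(v, set()).add(j)' (in-place mutation of the stored set) is
-- ported as insert of the grown set (same resulting mapping and position);
-- 'buckets.pop(d, ())' as getD + erase.
def mgStepB (k : Int) (st : PySem.Dict Int Int × PySem.Dict Int (PySem.Set Int) × Int)
    (j : Int) : PySem.Dict Int Int × PySem.Dict Int (PySem.Set Int) × Int :=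
  match st with
  | (counts, buckets, d) =>
    match counts.get? j with
    | some v =>
        -- buckets[v].discard(j); counts[j] = v + 1; buckets.setdefault(v+1, set()).add(j)
        let b1 := buckets.insert v ((buckets.getD v PySem.Set.empty).discard j)
        (counts.insert j (v + 1),
         b1.insert (v + 1) ((b1.getD (v + 1) PySem.Set.empty).add j), d)
    | none =>
      if (counts.size : Int) < k - 1 then
        (counts.insert j (d + 1),
         buckets.insert (d + 1) ((buckets.getD (d + 1) PySem.Set.empty).add j), d)
      else
        -- d += 1; for key in buckets.pop(d, ()): del counts[key]
        -- (erase order over the set cannot affect the resulting dict)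
        ((buckets.getD (d + 1) PySem.Set.empty).foldl PySem.Dict.erase counts,
         buckets.erase (d + 1), d + 1)

def misra_gries_counter_alt (stream : List Int) (k : Int) : List (Int × Int) :=
  let st := stream.foldl (mgStepB k) (PySem.Dict.empty, PySem.Dict.empty, 0)
  -- return {key: v - d for key, v in counts.items()}
  (PySem.Dict.ofList (st.1.items.map (fun p => (p.1, p.2 - st.2.2)))).items

-- ===== PRECONDITION & SPEC =====
def Spec_misra_gries_counter (stream : List Int) (k : Int) (out : List (Int × Int)) : Prop := out = misra_gries_counter_alt stream k
instance (stream : List Int) (k : Int) (out : List (Int × Int)) : Decidable (Spec_misra_gries_counter stream k out) := by unfold Spec_misra_gries_counter; infer_instance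

-- ===== CLAIM (what is proved, stated in full; the proofs are below) =====
def Claim_equal_misra_gries_counter : Prop := ∀ (stream : List Int) (k : Int), Dom_misra_gries_counter stream k → Spec_misra_gries_counter stream k (misra_gries_counter stream k)

-- ===== LEMMAS AND PROOFS =====

-- invariant tying A's dict to B's state: same keys in the same order with values
-- shifted by the offset, unique keys, all stored values above the offset, and the
-- bucket index exact (x is in bucket v iff counts maps x to v)
def mgInv (dA : PySem.Dict Int Int)
    (st : PySem.Dict Int Int × PySem.Dict Int (PySem.Set Int) × Int) : Prop :=
  dA.items = st.1.items.map (fun p => (p.1, p.2 - st.2.2)) ∧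
  st.1.keys.Nodup ∧
  (∀ p ∈ st.1.items, st.2.2 < p.2) ∧
  (∀ v x : Int, x ∈ st.2.1.getD v PySem.Set.empty ↔ (x, v) ∈ st.1.items)

-- A's inner decrement loop, characterised: over a nodup-key dict it decrements
-- every value and drops the entries that reach zero, preserving order
theorem mgDecLoop_chara (post pre : List (Int × Int))
    (h : ((pre ++ post).map (·.1)).Nodup) :
    (post.map (·.1)).foldl mgDecStep (PySem.Dict.mk (pre ++ post)) =
      PySem.Dict.mk (pre ++ post.filterMap
        (fun p => if p.2 - 1 = 0 then none else some (p.1, p.2 - 1))) := by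
  induction post generalizing pre with
  | nil => simp only [List.map_nil, List.foldl_nil, List.filterMap_nil]
  | cons hd rest ih =>
    obtain ⟨k0, v0⟩ := hd
    simp only [List.map_append, List.map_cons, List.nodup_append, List.nodup_cons] at h
    have hk0pre : ∀ p ∈ pre, p.1 ≠ k0 := by
      intro p hp heq
      exact h.2.2 _ (List.mem_map_of_mem hp) _ (by simp) heq
    have hk0rest : ∀ p ∈ rest, p.1 ≠ k0 := by
      intro p hp heq
      exact h.2.1.1 (heq ▸ List.mem_map_of_mem hp)
    have hnd : ((pre ++ (k0, v0) :: rest).map (·.1)).Nodup := by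
      simp only [List.map_append, List.map_cons, List.nodup_append, List.nodup_cons]
      exact h
    have hndrm : ((pre ++ rest).map (·.1)).Nodup := by
      simp only [List.map_append, List.nodup_append]
      exact ⟨h.1, h.2.1.2, fun a ha b hb => h.2.2 a ha b (List.mem_cons_of_mem _ hb)⟩
    have hndrep : (((pre ++ [(k0, v0 - 1)]) ++ rest).map (·.1)).Nodup := by
      simp only [List.append_assoc, List.singleton_append, List.map_append,
        List.map_cons, List.nodup_append, List.nodup_cons]
      exact h
    have hget : (PySem.Dict.mk (pre ++ (k0, v0) :: rest)).getD k0 0 = v0 :=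
      PySem.Dict.getD_of_mem_items _ (by simp) hnd 0
    have hcont : (PySem.Dict.mk (pre ++ (k0, v0) :: rest)).contains k0 = true := by
      simp [PySem.Dict.contains]
    have hins : (PySem.Dict.mk (pre ++ (k0, v0) :: rest)).insert k0 (v0 - 1) =
        PySem.Dict.mk (pre ++ (k0, v0 - 1) :: rest) := by
      apply PySem.Dict.ext
      rw [PySem.Dict.items_insert_of_contains _ _ hcont]
      show (pre ++ (k0, v0) :: rest).map _ = _
      rw [List.map_append, List.map_cons]
      congr 1
      · calc pre.map (fun p => if (p.1 == k0) = true then (k0, v0 - 1) else p)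
            = pre.map id := List.map_congr_left (fun p hp => by simp [hk0pre p hp])
          _ = pre := List.map_id _
      · congr 1
        · simp
        · calc rest.map (fun p => if (p.1 == k0) = true then (k0, v0 - 1) else p)
              = rest.map id := List.map_congr_left (fun p hp => by simp [hk0rest p hp])
            _ = rest := List.map_id _
    have hnd' : ((pre ++ (k0, v0 - 1) :: rest).map (·.1)).Nodup := by
      simp only [List.map_append, List.map_cons, List.nodup_append, List.nodup_cons]
      exact h
    have hget' : (PySem.Dict.mk (pre ++ (k0, v0 - 1) :: rest)).getD k0 0 = v0 - 1 :=
      PySem.Dict.getD_of_mem_items _ (by simp) hnd' 0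
    have hstep : mgDecStep (PySem.Dict.mk (pre ++ (k0, v0) :: rest)) k0 =
        if v0 - 1 = 0 then PySem.Dict.mk (pre ++ rest)
        else PySem.Dict.mk (pre ++ (k0, v0 - 1) :: rest) := by
      unfold mgDecStep
      simp only [hget, hins, hget']
      by_cases h0 : v0 - 1 = 0
      · rw [if_pos (by simp [h0]), if_pos h0]
        apply PySem.Dict.ext
        show (pre ++ (k0, v0 - 1) :: rest).filter _ = _
        rw [List.filter_append, List.filter_cons]
        simp only [beq_self_eq_true, Bool.not_true, if_neg (by simp : ¬ (false = true))]
        congr 1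
        · exact List.filter_eq_self.2 (fun p hp => by simp [hk0pre p hp])
        · exact List.filter_eq_self.2 (fun p hp => by simp [hk0rest p hp])
      · rw [if_neg (by simpa using h0), if_neg h0]
    rw [List.map_cons, List.foldl_cons, hstep]
    by_cases h0 : v0 - 1 = 0
    · rw [if_pos h0, ih pre hndrm]
      simp [h0]
    · rw [if_neg h0]
      have := ih (pre ++ [(k0, v0 - 1)]) hndrep
      rw [List.append_assoc] at this
      simp only [List.singleton_append] at this
      rw [this]
      simp [h0]

theorem ofList_items_of_nodup (l : List (Int × Int)) (h : (l.map (·.1)).Nodup) :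
    (PySem.Dict.ofList l).items = l := by
  have := PySem.Dict.items_foldl_insert_fresh l (·.1) (·.2) PySem.Dict.empty
    (by intro a _; simp [pysem]) h
  simpa [PySem.Dict.ofList, PySem.Dict.update] using this

theorem shift_filter (l : List (Int × Int)) (d : Int) :
    (l.map (fun p => (p.1, p.2 - d))).filterMap
        (fun p => if p.2 - 1 = 0 then none else some (p.1, p.2 - 1)) =
      (l.filter (fun p => p.2 != d + 1)).map (fun p => (p.1, p.2 - (d + 1))) := by
  induction l with
  | nil => simp
  | cons p t ih =>
    simp only [List.map_cons, List.filterMap_cons, List.filter_cons]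
    by_cases hp : p.2 = d + 1
    · simp [hp, ih]
    · have h1 : ¬ (p.2 - d - 1 = 0) := by omega
      simp only [h1, if_neg, bne_iff_ne, ne_eq, hp, not_false_eq_true, if_pos,
        List.map_cons, ih]
      have h2 : p.2 - d - 1 = p.2 - (d + 1) := by omega
      rw [h2]

-- find? over a filter removing one key
theorem find?_filter_ne {ν : Type} (l : List (Int × ν)) (k k' : Int) :
    (l.filter (fun p => !(p.1 == k))).find? (fun p => p.1 == k') =
      if k' = k then none else l.find? (fun p => p.1 == k') := by
  induction l with
  | nil => simp
  | cons p t ih =>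
    by_cases h1 : p.1 = k
    · by_cases h3 : k' = k
      · simp [List.filter_cons, h1, ih, h3]
      · have hkk : (k == k') = false := by
          simp only [beq_eq_false_iff_ne]; exact fun e => h3 e.symm
        simp [List.find?_cons, h1, ih, h3, hkk]
    · by_cases h2 : p.1 = k'
      · have hne : k' ≠ k := fun e => h1 (h2.trans e)
        simp [List.filter_cons, List.find?_cons, h1, h2, hne]
      · simp [List.filter_cons, List.find?_cons, h1, h2, ih]

theorem get?_erase_dict {ν : Type} (b : PySem.Dict Int ν) (k k' : Int) :
    (b.erase k).get? k' = if k' = k then none else b.get? k' := by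
  show ((b.items.filter fun p => !(p.1 == k)).find? (fun p => p.1 == k')).map (·.2) = _
  rw [find?_filter_ne]
  split <;> rfl

theorem getD_erase_dict {ν : Type} (b : PySem.Dict Int ν) (k k' : Int) (dflt : ν) :
    (b.erase k).getD k' dflt = if k' = k then dflt else b.getD k' dflt := by
  simp only [PySem.Dict.getD, get?_erase_dict]
  split <;> rfl

-- a fold of erase over a list of keys is one filter of the items
theorem eraseFold (ks : List Int) (c : PySem.Dict Int Int) :
    (ks.foldl PySem.Dict.erase c).items = c.items.filter (fun p => decide (p.1 ∉ ks)) := by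
  induction ks generalizing c with
  | nil => simp
  | cons a t ih =>
    rw [List.foldl_cons, ih]
    show (c.items.filter fun p => !(p.1 == a)).filter _ = _
    rw [List.filter_filter]
    apply List.filter_congr
    intro p _
    by_cases h1 : p.1 = a <;> by_cases h2 : p.1 ∈ t <;> simp [h1, h2]

theorem mgStep_preserves (k j : Int) (dA : PySem.Dict Int Int)
    (st : PySem.Dict Int Int × PySem.Dict Int (PySem.Set Int) × Int) (hInv : mgInv dA st) :
    mgInv (mgStepA k dA j) (mgStepB k st j) := by
  obtain ⟨counts, buckets, d⟩ := st
  obtain ⟨hitems, hnd, hpos, hbk⟩ := hInv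
  simp only at hitems hnd hpos hbk
  have hndA : dA.keys.Nodup := by
    show (dA.items.map (·.1)).Nodup
    rw [hitems, List.map_map]
    exact hnd
  have hcont : dA.contains j = counts.contains j := by
    simp only [PySem.Dict.contains, hitems, List.any_map]
    rfl
  have hmem : ∀ x w : Int, (x, w) ∈ counts.items ↔ counts.get? x = some w :=
    fun x w => (PySem.Dict.get?_eq_some_iff_mem_items counts x w hnd).symm
  cases hg : counts.get? j with
  | some v =>
    have hjv : (j, v) ∈ counts.items := (hmem j v).2 hg
    have hc : counts.contains j = true := by
      rw [PySem.Dict.contains_eq_isSome_get?, hg]; rfl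
    have hgB : counts.getD j 0 = v := by simp [PySem.Dict.getD, hg]
    have hvA : (j, v - d) ∈ dA.items := by
      rw [hitems]; exact List.mem_map_of_mem hjv
    have hgA : dA.getD j 0 = v - d := PySem.Dict.getD_of_mem_items _ hvA hndA 0
    have hcA : dA.contains j = true := hcont ▸ hc
    have hdv : d < v := hpos _ hjv
    have hA : mgStepA k dA j = dA.insert j (dA.getD j 0 + 1) := by
      simp [mgStepA, hcA]
    have hB : mgStepB k (counts, buckets, d) j =
        (counts.insert j (v + 1),
         (buckets.insert v ((buckets.getD v PySem.Set.empty).discard j)).insert (v + 1)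
           (((buckets.insert v ((buckets.getD v PySem.Set.empty).discard j)).getD (v + 1)
             PySem.Set.empty).add j), d) := by
      simp [mgStepB, hg]
    rw [hA, hB]
    unfold mgInv
    refine ⟨?_, ?_, ?_, ?_⟩
    all_goals simp only
    · rw [PySem.Dict.items_insert_of_contains _ _ hcA,
        PySem.Dict.items_insert_of_contains _ _ hc, hitems, hgA,
        List.map_map, List.map_map]
      apply List.map_congr_left
      intro p hp
      by_cases hpj : p.1 = j <;> simp [Function.comp, hpj] <;> omega
    · rw [PySem.Dict.keys_insert_of_contains _ _ hc]; exact hnd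
    · intro p hp
      rcases (PySem.Dict.mem_items_insert _ _ _ _).1 hp with h1 | h1
      · subst h1; simpa using by omega
      · exact hpos p h1.1
    · intro w x
      have hvne : v ≠ v + 1 := by omega
      by_cases hw1 : w = v + 1
      · subst hw1
        rw [PySem.Dict.getD_insert]
        rw [if_pos rfl]
        rw [PySem.Set.mem_add]
        rw [PySem.Dict.getD_insert, if_neg (by omega : ¬ v + 1 = v)]
        rw [hbk (v + 1) x]
        rw [PySem.Dict.mem_items_insert]
        constructor
        · rintro (hx | rfl)
          · have hxj : x ≠ j := by
              intro he
              have hx2 := (hmem x (v + 1)).1 hx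
              rw [he, hg] at hx2
              simp at hx2
            exact Or.inr ⟨hx, hxj⟩
          · exact Or.inl rfl
        · rintro (hx | ⟨hx, _⟩)
          · exact Or.inr (congrArg Prod.fst hx)
          · exact Or.inl hx
      · rw [PySem.Dict.getD_insert, if_neg hw1]
        rw [PySem.Dict.mem_items_insert]
        by_cases hwv : w = v
        · rw [PySem.Dict.getD_insert, if_pos hwv, PySem.Set.mem_discard, hbk v x, hwv]
          constructor
          · rintro ⟨hx, hxj⟩; exact Or.inr ⟨hx, hxj⟩
          · rintro (hx | ⟨hx, hxj⟩)
            · exact absurd (congrArg Prod.snd hx) (by simpa using hvne)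
            · exact ⟨hx, hxj⟩
        · rw [PySem.Dict.getD_insert, if_neg hwv, hbk w x]
          constructor
          · intro hx
            have hxj : x ≠ j := by
              intro he
              have hx2 := (hmem x w).1 hx
              rw [he, hg] at hx2
              exact hwv (by injection hx2 with h2; omega)
            exact Or.inr ⟨hx, hxj⟩
          · rintro (hx | ⟨hx, _⟩)
            · exact absurd (congrArg Prod.snd hx) (by simpa using hw1)
            · exact hx
  | none =>
    have hc : counts.contains j = false := by
      rw [PySem.Dict.contains_eq_isSome_get?, hg]; rfl
    have hcA : dA.contains j = false := by rw [hcont, hc]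
    have hsize : dA.size = counts.size := by simp [PySem.Dict.size, hitems]
    have hfresh : ∀ w : Int, ¬ (j, w) ∈ counts.items := by
      intro w hw
      rw [hmem j w, hg] at hw
      simp at hw
    by_cases hs : (counts.size : Int) < k - 1
    · have hA : mgStepA k dA j = dA.insert j 1 := by
        simp [mgStepA, hcA, hsize, hs]
      have hB : mgStepB k (counts, buckets, d) j =
          (counts.insert j (d + 1),
           buckets.insert (d + 1) ((buckets.getD (d + 1) PySem.Set.empty).add j), d) := by
        simp [mgStepB, hg, hs]
      rw [hA, hB]
      unfold mgInv
      have hjA := PySem.Dict.items_insert_of_not_contains _ (1 : Int) hcA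
      have hjB := PySem.Dict.items_insert_of_not_contains _ (d + 1) hc
      refine ⟨?_, ?_, ?_, ?_⟩
      all_goals simp only
      · rw [hjA, hjB, hitems, List.map_append]
        simp
      · rw [PySem.Dict.keys_insert_of_not_contains _ _ hc]
        refine List.Nodup.append hnd (List.nodup_singleton j) ?_
        intro a ha hb
        simp only [List.mem_singleton] at hb
        subst hb
        exact absurd ((PySem.Dict.contains_iff_mem_keys _ _).2 ha) (by simp [hc])
      · intro p hp
        rcases (PySem.Dict.mem_items_insert _ _ _ _).1 hp with h1 | h1
        · subst h1; simpa using by omega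
        · exact hpos p h1.1
      · intro w x
        rw [PySem.Dict.mem_items_insert]
        by_cases hw : w = d + 1
        · subst hw
          rw [PySem.Dict.getD_insert, if_pos rfl, PySem.Set.mem_add, hbk (d + 1) x]
          constructor
          · rintro (hx | rfl)
            · refine Or.inr ⟨hx, ?_⟩
              rintro rfl
              exact hfresh _ hx
            · exact Or.inl rfl
          · rintro (hx | ⟨hx, _⟩)
            · exact Or.inr (congrArg Prod.fst hx)
            · exact Or.inl hx
        · rw [PySem.Dict.getD_insert, if_neg hw, hbk w x]
          constructor
          · intro hx
            refine Or.inr ⟨hx, ?_⟩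
            rintro rfl
            exact hfresh _ hx
          · rintro (hx | ⟨hx, _⟩)
            · exact absurd (congrArg Prod.snd hx) (by simpa using hw)
            · exact hx
    · have hA : mgStepA k dA j = dA.keys.foldl mgDecStep dA := by
        simp [mgStepA, hcA, hsize, hs]
      have hB : mgStepB k (counts, buckets, d) j =
          ((buckets.getD (d + 1) PySem.Set.empty).foldl PySem.Dict.erase counts,
           buckets.erase (d + 1), d + 1) := by
        simp [mgStepB, hg, hs]
      rw [hA, hB]
      unfold mgInv
      have hloop := mgDecLoop_chara dA.items [] (by simpa [PySem.Dict.keys] using hndA)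
      simp only [List.nil_append] at hloop
      have hkeys' : dA.keys = dA.items.map (·.1) := rfl
      -- keys evicted by B are exactly the keys whose stored count is d + 1
      have hksfilter : counts.items.filter
            (fun p => decide (p.1 ∉ buckets.getD (d + 1) PySem.Set.empty)) =
          counts.items.filter (fun p => p.2 != d + 1) := by
        apply List.filter_congr
        intro p hp
        have h5 : (p.1, d + 1) ∈ counts.items ↔ p.2 = d + 1 := by
          constructor
          · intro hm
            have e1 := (hmem p.1 (d + 1)).1 hm
            have e2 := (hmem p.1 p.2).1 hp
            rw [e1] at e2
            injection e2 with h2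
            omega
          · rintro h; rw [← h]; exact hp
        by_cases hm : p.2 = d + 1
        · have hin : p.1 ∈ buckets.getD (d + 1) PySem.Set.empty :=
            (hbk (d + 1) p.1).mpr (h5.mpr hm)
          simp [hm]
          exact hin
        · have hnin : p.1 ∉ buckets.getD (d + 1) ([] : PySem.Set Int) :=
            fun hin => hm (h5.mp ((hbk (d + 1) p.1).mp hin))
          simp [hm, hnin]
      have hBitems : ((buckets.getD (d + 1) PySem.Set.empty).foldl
            PySem.Dict.erase counts).items =
          counts.items.filter (fun p => p.2 != d + 1) := by
        rw [eraseFold, hksfilter]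
      refine ⟨?_, ?_, ?_, ?_⟩
      all_goals simp only
      · show (dA.keys.foldl mgDecStep dA).items = _
        rw [hkeys']
        have hmkA : PySem.Dict.mk dA.items = dA := rfl
        rw [hmkA] at hloop
        rw [hloop]
        show dA.items.filterMap _ = _
        rw [hBitems, hitems, shift_filter]
      · show (((buckets.getD (d + 1) PySem.Set.empty).foldl
            PySem.Dict.erase counts).items.map (·.1)).Nodup
        rw [hBitems]
        have hsub : List.Sublist
            ((counts.items.filter (fun p => p.2 != d + 1)).map (·.1))
            (counts.items.map (·.1)) := List.Sublist.map _ List.filter_sublist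
        exact hsub.nodup hnd
      · intro p hp
        rw [hBitems] at hp
        have h1 := hpos p (List.mem_of_mem_filter hp)
        have h2 := List.of_mem_filter hp
        simp only [bne_iff_ne, ne_eq, decide_eq_true_eq] at h2
        omega
      · intro w x
        rw [getD_erase_dict]
        by_cases hw : w = d + 1
        · subst hw
          rw [if_pos rfl, hBitems]
          simp [List.mem_filter]
        · rw [if_neg hw, hBitems, hbk w x, List.mem_filter]
          simp [hw]

theorem mgFold_preserves (k : Int) (stream : List Int) (dA : PySem.Dict Int Int)
    (st : PySem.Dict Int Int × PySem.Dict Int (PySem.Set Int) × Int) (hInv : mgInv dA st) :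
    mgInv (stream.foldl (mgStepA k) dA) (stream.foldl (mgStepB k) st) := by
  induction stream generalizing dA st with
  | nil => exact hInv
  | cons j rest ih => exact ih _ _ (mgStep_preserves k j dA st hInv)

-- ===== VERDICT (by name: the statement is the Claim_ definition above) =====
theorem misra_gries_counter_spec : Claim_equal_misra_gries_counter := by
  intro stream k _
  unfold Spec_misra_gries_counter misra_gries_counter misra_gries_counter_alt
  have h := mgFold_preserves k stream PySem.Dict.empty (PySem.Dict.empty, PySem.Dict.empty, 0)
    ⟨rfl, List.nodup_nil, by intro p hp; simp [PySem.Dict.empty] at hp,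
     by intro v x; simp [PySem.Dict.empty, PySem.Dict.getD, PySem.Dict.get?, PySem.Set.empty]⟩
  obtain ⟨h1, h2, _, _⟩ := h
  rw [ofList_items_of_nodup]
  · exact h1
  · simpa [List.map_map, Function.comp] using h2
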